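-- pv_equiv track=rewrite | github.com/running-machin/video_summarizer | annotation/auto_label.py | check_gender
-- ===== SOURCE A (Python) =====
-- def check_gender(dict_list):
--     genders = (0, 0)
--     for d in dict_list:
--         if 'name' in d:
--             # if 'woman' in d['name'].lower() and d['confidence'] > 0.6:
--             #     genders = (genders[0], genders[1] + 1)
--             # elif 'man' in d['name'].lower() and d['confidence'] > 0.6:
--             #     genders = (genders[0] + 1, genders[1])
--             if 'woman' in d['name'].lower():
--                 genders = (genders[0], genders[1] + 1)
--             elif 'man' in d['name'].lower():
--                 genders = (genders[0] + 1, genders[1])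
--     return genders
-- ===== SOURCE B (Python) =====
-- def check_gender(dict_list):
--     women = sum(1 for d in dict_list
--                 if 'name' in d and 'woman' in d['name'].lower())
--     men = sum(1 for d in dict_list
--               if 'name' in d and 'man' in d['name'].lower()
--               and 'woman' not in d['name'].lower())
--     return (men, women)
-- ===== Notes on version B (the rewrite author's own statement) =====
-- stated objective: simpler
-- what changed: Replaces the single accumulating loop over a tuple with two independent generator-expression counts (men = names containing 'man' but not 'woman', women = names containing 'woman'), returning the pair directly.
import Mathlib
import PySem

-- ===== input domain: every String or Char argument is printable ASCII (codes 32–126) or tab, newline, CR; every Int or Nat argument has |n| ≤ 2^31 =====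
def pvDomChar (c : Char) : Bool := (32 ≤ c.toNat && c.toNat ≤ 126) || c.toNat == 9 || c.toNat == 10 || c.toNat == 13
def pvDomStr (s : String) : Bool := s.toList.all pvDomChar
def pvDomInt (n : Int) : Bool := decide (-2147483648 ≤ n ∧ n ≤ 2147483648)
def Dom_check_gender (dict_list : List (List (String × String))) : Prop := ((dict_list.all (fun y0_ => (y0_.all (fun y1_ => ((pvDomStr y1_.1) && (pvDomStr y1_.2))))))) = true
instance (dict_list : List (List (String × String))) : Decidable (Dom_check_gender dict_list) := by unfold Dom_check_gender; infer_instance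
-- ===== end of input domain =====

-- B: two independent countP passes (men excluding 'woman' names, women) instead of A's single accumulating loop; same values.
-- B: two independent countP passes (men = 'man'-but-not-'woman' names, women = 'woman' names) instead of A's single accumulating loop.
-- ===== PORT A =====
def pyStep (genders : Int × Int) (d : List (String × String)) : Int × Int :=
  match (PySem.Dict.mk d).get? "name" with
  | some name =>
      if PySem.Str.isIn "woman" (PySem.Str.lower name) then (genders.1, genders.2 + 1)
      else if PySem.Str.isIn "man" (PySem.Str.lower name) then (genders.1 + 1, genders.2)
      else genders
  | none => genders

def check_gender (dict_list : List (List (String × String))) : Int × Int :=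
  dict_list.foldl pyStep (0, 0)

-- ===== PORT B =====
-- helper: 'name' in d and sub in d['name'].lower()
def nameHas (d : List (String × String)) (sub : String) : Bool :=
  match (PySem.Dict.mk d).get? "name" with
  | some name => PySem.Str.isIn sub (PySem.Str.lower name)
  | none => false

def isWomanEntry (d : List (String × String)) : Bool := nameHas d "woman"

def isManEntry (d : List (String × String)) : Bool := nameHas d "man" && !nameHas d "woman"

def check_gender_alt (dict_list : List (List (String × String))) : Int × Int :=
  ((dict_list.countP isManEntry : Int), (dict_list.countP isWomanEntry : Int))

-- ===== PRECONDITION & SPEC =====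
def Spec_check_gender (dict_list : List (List (String × String))) (out : Int × Int) : Prop := out = check_gender_alt dict_list
instance (dict_list : List (List (String × String))) (out : Int × Int) : Decidable (Spec_check_gender dict_list out) := by unfold Spec_check_gender; infer_instance

-- ===== CLAIM (what is proved, stated in full; the proofs are below) =====
def Claim_equal_check_gender : Prop := ∀ (dict_list : List (List (String × String))), Dom_check_gender dict_list → Spec_check_gender dict_list (check_gender dict_list)

-- ===== LEMMAS AND PROOFS =====
theorem foldl_counts (l : List (List (String × String))) (a b : Int) :
    l.foldl pyStep (a, b)
      = (a + (l.countP isManEntry : Int), b + (l.countP isWomanEntry : Int)) := by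
  induction l generalizing a b with
  | nil => simp
  | cons d t ih =>
    simp only [List.foldl_cons, List.countP_cons]
    rcases h : (PySem.Dict.mk d).get? "name" with _ | name
    · have hs : pyStep (a, b) d = (a, b) := by simp [pyStep, h]
      rw [hs, ih]
      refine Prod.ext ?_ ?_ <;> simp [isManEntry, isWomanEntry, nameHas, h]
    · by_cases hw : PySem.Chars.isIn ['w','o','m','a','n'] (PySem.Chars.lower name.toList) = true
      · have hs : pyStep (a, b) d = (a, b + 1) := by simp [pyStep, h, hw]
        rw [hs, ih]
        refine Prod.ext ?_ ?_ <;> simp [isManEntry, isWomanEntry, nameHas, h, hw] <;>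
          push_cast <;> ring
      · by_cases hm : PySem.Chars.isIn ['m','a','n'] (PySem.Chars.lower name.toList) = true
        · have hs : pyStep (a, b) d = (a + 1, b) := by simp [pyStep, h, hw, hm]
          rw [hs, ih]
          refine Prod.ext ?_ ?_ <;> simp [isManEntry, isWomanEntry, nameHas, h, hw, hm] <;>
            push_cast <;> ring
        · have hs : pyStep (a, b) d = (a, b) := by simp [pyStep, h, hw, hm]
          rw [hs, ih]
          refine Prod.ext ?_ ?_ <;> simp [isManEntry, isWomanEntry, nameHas, h, hw, hm]

-- ===== VERDICT (by name: the statement is the Claim_ definition above) =====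
theorem check_gender_spec : Claim_equal_check_gender := by
  intro dict_list _
  unfold Spec_check_gender check_gender check_gender_alt
  rw [foldl_counts]
  simp
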